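-- pv_equiv track=rewrite | github.com/mdsingh007/kushu | SmallScripts/26_july.py | rolls
-- ===== SOURCE A (Python) =====
-- def rolls(lst):
--     a = []
--     multiplier = 1
--
--     for elem in lst:
--         a.append(elem*multiplier)
--
--         if elem == 1:
--             multiplier = 0
--
--         elif elem == 6:
--             multiplier = 2
--         else:
--             multiplier = 1
--
--     return sum(a)
-- ===== SOURCE B (Python) =====
-- def rolls(lst):
--     pairs = list(zip(lst, lst[1:]))
--     return (sum(lst)
--             - sum(e for p, e in pairs if p == 1)
--             + sum(e for p, e in pairs if p == 6))
-- ===== Notes on version B (the rewrite author's own statement) =====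
-- stated objective: alternative
-- what changed: Replaces the weighted accumulation with running multiplier state by a total-plus-corrections formulation: take sum(lst) and adjust it with filtered sums over adjacent pairs (subtract the successor of each 1, add the successor of each 6); no per-position weight is ever computed.
import Mathlib
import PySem

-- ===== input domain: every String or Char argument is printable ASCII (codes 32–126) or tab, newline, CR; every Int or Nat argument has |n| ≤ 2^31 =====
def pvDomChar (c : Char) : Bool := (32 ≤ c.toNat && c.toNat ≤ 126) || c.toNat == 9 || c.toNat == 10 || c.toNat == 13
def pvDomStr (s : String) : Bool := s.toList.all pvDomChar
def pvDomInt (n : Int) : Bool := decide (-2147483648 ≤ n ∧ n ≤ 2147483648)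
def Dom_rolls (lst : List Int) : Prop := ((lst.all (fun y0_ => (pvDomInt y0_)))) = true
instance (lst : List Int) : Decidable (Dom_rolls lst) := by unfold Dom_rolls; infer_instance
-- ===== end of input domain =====

-- B computes sum(lst) plus corrections from adjacent pairs (successor of a 1 subtracted, of a 6 added) instead of accumulating with a running multiplier (alternative formulation, same cost).


-- ===== PORT A =====
-- loop state: (a, multiplier); each step appends elem*multiplier and updates multiplier by A's branch chain
def rollsStep (s : List Int × Int) (elem : Int) : List Int × Int :=
  (s.1 ++ [elem * s.2], if elem = 1 then 0 else if elem = 6 then 2 else 1)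

def rolls (lst : List Int) : Int :=
  (lst.foldl rollsStep ([], 1)).1.sum

-- ===== PORT B =====
-- pairs = zip(lst, lst[1:]); sum(lst) - (successors of 1s) + (successors of 6s)
def rolls_alt (lst : List Int) : Int :=
  let pairs := lst.zip lst.tail
  lst.sum - ((pairs.filter (fun pe => pe.1 == 1)).map Prod.snd).sum
          + ((pairs.filter (fun pe => pe.1 == 6)).map Prod.snd).sum

-- ===== PRECONDITION & SPEC =====
def Spec_rolls (lst : List Int) (out : Int) : Prop := out = rolls_alt lst
instance (lst : List Int) (out : Int) : Decidable (Spec_rolls lst out) := by unfold Spec_rolls; infer_instance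

-- ===== CLAIM (what is proved, stated in full; the proofs are below) =====
def Claim_equal_rolls : Prop := ∀ (lst : List Int), Dom_rolls lst → Spec_rolls lst (rolls lst)

-- ===== LEMMAS AND PROOFS =====
-- net correction B adds to sum(lst)
def corr (lst : List Int) : Int :=
  (((lst.zip lst.tail).filter (fun pe => pe.1 == 6)).map Prod.snd).sum
    - (((lst.zip lst.tail).filter (fun pe => pe.1 == 1)).map Prod.snd).sum

lemma corr_cons (x y : Int) (ys : List Int) :
    corr (x :: y :: ys) = (if x = 6 then y else 0) - (if x = 1 then y else 0) + corr (y :: ys) := by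
  by_cases hx1 : x = 1 <;> by_cases hx6 : x = 6 <;>
    simp_all [corr, List.zip] <;> ring

def multOf (e : Int) : Int := if e = 1 then 0 else if e = 6 then 2 else 1

lemma rolls_loop_key : ∀ (lst a : List Int) (m : Int),
    ((lst.foldl rollsStep (a, m)).1).sum
      = a.sum + lst.sum + (m - 1) * lst.headI + corr lst := by
  intro lst
  induction lst with
  | nil => intro a m; simp [corr]
  | cons x xs ih =>
    intro a m
    have h : (List.foldl rollsStep (a, m) (x :: xs)).1
        = (List.foldl rollsStep (a ++ [x * m], multOf x) xs).1 := by
      simp [List.foldl, rollsStep, multOf]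
    rw [h, ih (a ++ [x * m]) (multOf x)]
    cases xs with
    | nil => simp [corr, multOf]; ring
    | cons y ys =>
      rw [corr_cons]
      simp only [List.sum_append, List.sum_cons, List.headI, multOf]
      split_ifs <;> simp_all <;> ring

-- ===== VERDICT (by name: the statement is the Claim_ definition above) =====
theorem rolls_spec : Claim_equal_rolls := by
  intro lst _
  unfold Spec_rolls rolls rolls_alt
  have := rolls_loop_key lst [] 1
  simp only [List.sum_nil, Int.sub_self, Int.zero_add, zero_mul] at this
  rw [this]
  simp [corr]
  ring
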